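-- pv_equiv track=rewrite | github.com/giovannipinna96/tokenprob | codebert_error_detector.py | _map_token_to_line
-- ===== SOURCE A (Python) =====
-- from typing import List, Dict, Tuple, Optional, Any
--
-- def _map_token_to_line(code: str, token_positions: List[int]) -> Dict[int, Tuple[int, int]]:
--     """
--     Map token positions to (line_number, column) in source code.
--
--     Args:
--         code: Source code string
--         token_positions: List of character positions for each token
--
--     Returns:
--         Dictionary mapping token index to (line_number, column)
--     """
--     lines = code.split('\n')
--     char_to_line = {}
--     current_char = 0
--
--     for line_idx, line in enumerate(lines):
--         line_len = len(line) + 1  # +1 for newline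
--         for i in range(line_len):
--             char_to_line[current_char + i] = (line_idx + 1, i)
--         current_char += line_len
--
--     # Map tokens to lines
--     token_to_line = {}
--     for token_idx, char_pos in enumerate(token_positions):
--         if char_pos in char_to_line:
--             token_to_line[token_idx] = char_to_line[char_pos]
--         else:
--             # Default to first line if mapping fails
--             token_to_line[token_idx] = (1, 0)
--
--     return token_to_line
-- ===== SOURCE B (Python) =====
-- from typing import List, Dict, Tuple
--
--
-- def _map_token_to_line(code: str, token_positions: List[int]) -> Dict[int, Tuple[int, int]]:
--     """Prefix array of line-start offsets + binary search per token,
--     instead of one dict entry per character of the source."""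
--     starts = [0]
--     for i, ch in enumerate(code):
--         if ch == '\n':
--             starts.append(i + 1)
--     n = len(code)
--     result = {}
--     for idx, pos in enumerate(token_positions):
--         if 0 <= pos <= n:
--             lo, hi = 0, len(starts)
--             while lo < hi:
--                 mid = (lo + hi) // 2
--                 if starts[mid] <= pos:
--                     lo = mid + 1
--                 else:
--                     hi = mid
--             result[idx] = (lo, pos - starts[lo - 1])
--         else:
--             result[idx] = (1, 0)
--     return result
-- ===== Notes on version B (the rewrite author's own statement) =====
-- stated objective: faster
-- what changed: Instead of materialising a dict entry for every character position of the source (A), B records only the line-start offsets in a prefix array and locates each token's line by binary search, with column = position minus line start.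
import Mathlib
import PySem

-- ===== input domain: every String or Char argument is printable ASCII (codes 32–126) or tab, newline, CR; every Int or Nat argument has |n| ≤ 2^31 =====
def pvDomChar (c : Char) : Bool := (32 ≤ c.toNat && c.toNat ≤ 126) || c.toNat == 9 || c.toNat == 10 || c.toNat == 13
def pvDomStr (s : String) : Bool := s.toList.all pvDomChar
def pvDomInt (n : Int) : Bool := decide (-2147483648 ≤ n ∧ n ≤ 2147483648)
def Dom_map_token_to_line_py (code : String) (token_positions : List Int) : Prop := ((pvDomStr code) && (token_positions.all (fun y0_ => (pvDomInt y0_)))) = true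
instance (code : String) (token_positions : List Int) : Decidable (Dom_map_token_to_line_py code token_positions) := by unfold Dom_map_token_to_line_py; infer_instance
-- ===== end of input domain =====

-- B replaces A's dict with one entry per character position by a prefix array of
-- line-start offsets plus a binary search per token (measured faster, constant factor).

-- ===== PORT A =====
def map_token_to_line_py (code : String) (token_positions : List Int) : List (Int × Int × Int) :=
  -- lines = code.split('\n'); fill char_to_line for every position of every line; then map tokens
  let char_to_line : PySem.Dict Int (Int × Int) :=
    ((PySem.List.enumerate (PySem.Chars.splitOn code.toList ['\n']) 0).foldl
      (fun (st : PySem.Dict Int (Int × Int) × Int) lp =>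
        ((PySem.List.pyRange 0 ((lp.2.length : Int) + 1) 1).foldl
           (fun d i => d.insert (st.2 + i) (lp.1 + 1, i)) st.1,
         st.2 + ((lp.2.length : Int) + 1)))
      (PySem.Dict.empty, 0)).1
  ((PySem.List.enumerate token_positions 0).foldl
    (fun t p =>
      match char_to_line.get? p.2 with
      | some v => t.insert p.1 v
      | none => t.insert p.1 ((1 : Int), (0 : Int)))
    PySem.Dict.empty).items

-- ===== PORT B =====
-- Source B's hand-written binary search (the `while lo < hi` loop); starts[mid] is always
-- in range when called as in the port, so pyGetD's default is never used there
def pvBisect (ls : List Int) (x : Int) (lo hi : Int) : Int :=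
  if h : lo < hi then
    if PySem.List.pyGetD ls (PySem.Int.floordiv (lo + hi) 2) 0 ≤ x then
      pvBisect ls x (PySem.Int.floordiv (lo + hi) 2 + 1) hi
    else
      pvBisect ls x lo (PySem.Int.floordiv (lo + hi) 2)
  else lo
termination_by (hi - lo).toNat
decreasing_by
  · have h1 := PySem.Int.floordiv_two_mid_bounds (le_of_lt h)
    have h2 : PySem.Int.floordiv (lo + hi) 2 < hi :=
      (PySem.Int.floordiv_lt_iff_lt_mul (by norm_num : (0:Int) < 2)).2 (by omega)
    omega
  · have h1 := PySem.Int.floordiv_two_mid_bounds (le_of_lt h)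
    have h2 : PySem.Int.floordiv (lo + hi) 2 < hi :=
      (PySem.Int.floordiv_lt_iff_lt_mul (by norm_num : (0:Int) < 2)).2 (by omega)
    omega

def map_token_to_line_py_alt (code : String) (token_positions : List Int) : List (Int × Int × Int) :=
  -- starts = [0] plus i+1 for every newline; per token: binary search for the line
  let starts : List Int :=
    (PySem.List.enumerate code.toList 0).foldl
      (fun acc p => if p.2 = '\n' then acc ++ [p.1 + 1] else acc) [(0 : Int)]
  let n : Int := (code.toList.length : Int)
  ((PySem.List.enumerate token_positions 0).foldl
    (fun t p =>
      if 0 ≤ p.2 ∧ p.2 ≤ n then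
        t.insert p.1 (pvBisect starts p.2 0 (starts.length : Int),
                      p.2 - PySem.List.pyGetD starts (pvBisect starts p.2 0 (starts.length : Int) - 1) 0)
      else t.insert p.1 ((1 : Int), (0 : Int)))
    PySem.Dict.empty).items

-- ===== PRECONDITION & SPEC =====
def Spec_map_token_to_line_py (code : String) (token_positions : List Int) (out : List (Int × Int × Int)) : Prop := out = map_token_to_line_py_alt code token_positions
instance (code : String) (token_positions : List Int) (out : List (Int × Int × Int)) : Decidable (Spec_map_token_to_line_py code token_positions out) := by unfold Spec_map_token_to_line_py; infer_instance

-- ===== CLAIM (what is proved, stated in full; the proofs are below) =====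
def Claim_equal_map_token_to_line_py : Prop := ∀ (code : String) (token_positions : List Int), Dom_map_token_to_line_py code token_positions → Spec_map_token_to_line_py code token_positions (map_token_to_line_py code token_positions)

-- ===== LEMMAS AND PROOFS =====

-- structural version of code.split('\n') with an accumulator (mirrors splitOn.go)
def splitNL (pre : List Char) : List Char → List (List Char)
  | [] => [pre]
  | c :: rest => if c = '\n' then pre :: splitNL [] rest else splitNL (pre ++ [c]) rest

-- structural version of B's line-start list (positions just after each '\n')
def lsAux : List Char → Int → List Int
  | [], _ => []
  | c :: rest, i => if c = '\n' then (i + 1) :: lsAux rest (i + 1) else lsAux rest (i + 1)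

-- the (line, column) of relative position rel in a list of lines
def specL : List (List Char) → Int → Int × Int
  | [], _ => (1, 0)
  | l :: rest, rel =>
    if rel ≤ (l.length : Int) then (1, rel)
    else ((specL rest (rel - ((l.length : Int) + 1))).1 + 1,
          (specL rest (rel - ((l.length : Int) + 1))).2)

def totalLen (ls : List (List Char)) : Int := (ls.map (fun l => (l.length : Int) + 1)).sum

theorem go_eq (l : List Char) : ∀ (fuel : Nat) (cur : List Char) (acc : List (List Char)),
    l.length ≤ fuel →
    PySem.Chars.splitOn.go ['\n'] fuel l cur acc = acc.reverse ++ splitNL cur.reverse l := by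
  induction l with
  | nil =>
    intro fuel cur acc _
    cases fuel <;> simp [PySem.Chars.splitOn.go, splitNL]
  | cons c rest ih =>
    intro fuel cur acc hf
    cases fuel with
    | zero => simp at hf
    | succ f =>
      by_cases hc : c = '\n'
      · subst hc
        rw [show PySem.Chars.splitOn.go ['\n'] (f+1) ('\n' :: rest) cur acc
              = PySem.Chars.splitOn.go ['\n'] f rest [] (cur.reverse :: acc) from by
            simp [PySem.Chars.splitOn.go, List.isPrefixOf]]
        rw [ih f [] (cur.reverse :: acc) (by simpa using hf)]
        simp [splitNL]
      · rw [show PySem.Chars.splitOn.go ['\n'] (f+1) (c :: rest) cur acc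
              = PySem.Chars.splitOn.go ['\n'] f rest (c :: cur) acc from by
            simp [PySem.Chars.splitOn.go, List.isPrefixOf, Ne.symm hc]]
        rw [ih f (c :: cur) acc (by simpa using hf)]
        simp [splitNL, hc]

theorem splitOn_eq (cs : List Char) : PySem.Chars.splitOn cs ['\n'] = splitNL [] cs := by
  rw [PySem.Chars.splitOn, go_eq cs (cs.length + 1) [] [] (by omega)]
  simp

theorem splitNL_no_nl (l : List Char) (h : '\n' ∉ l) : ∀ pre, splitNL pre l = [pre ++ l] := by
  induction l with
  | nil => intro pre; simp [splitNL]
  | cons c rest ih =>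
    intro pre
    simp only [List.mem_cons, not_or] at h
    rw [splitNL, if_neg (fun hc => h.1 hc.symm), ih h.2]
    simp

theorem splitNL_append (l : List Char) (h : '\n' ∉ l) :
    ∀ pre rest, splitNL pre (l ++ rest) = splitNL (pre ++ l) rest := by
  induction l with
  | nil => intro pre rest; simp
  | cons c t ih =>
    intro pre rest
    simp only [List.mem_cons, not_or] at h
    rw [List.cons_append, splitNL, if_neg (fun hc => h.1 hc.symm), ih h.2]
    simp

theorem totalLen_splitNL (cs : List Char) :
    ∀ pre, totalLen (splitNL pre cs) = (pre.length : Int) + (cs.length : Int) + 1 := by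
  induction cs with
  | nil => intro pre; simp [splitNL, totalLen]
  | cons c rest ih =>
    intro pre
    by_cases hc : c = '\n'
    · subst hc
      rw [splitNL, if_pos rfl]
      simp only [totalLen, List.map_cons, List.sum_cons] at *
      rw [ih []]
      simp; ring
    · rw [splitNL, if_neg hc, ih (pre ++ [c])]
      simp; ring

theorem lsAux_shift (cs : List Char) : ∀ i j : Int, lsAux cs (i + j) = (lsAux cs i).map (· + j) := by
  induction cs with
  | nil => intro i j; simp [lsAux]
  | cons c rest ih =>
    intro i j
    by_cases hc : c = '\n'
    · subst hc
      rw [lsAux, if_pos rfl, lsAux, if_pos rfl]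
      rw [show i + j + 1 = (i + 1) + j by ring, ih]
      simp
    · rw [lsAux, if_neg hc, lsAux, if_neg hc, show i + j + 1 = (i + 1) + j by ring, ih]

theorem lsAux_no_nl (cs : List Char) (h : '\n' ∉ cs) : ∀ i, lsAux cs i = [] := by
  induction cs with
  | nil => intro i; rfl
  | cons c rest ih =>
    intro i
    simp only [List.mem_cons, not_or] at h
    rw [lsAux, if_neg (fun hc => h.1 hc.symm), ih h.2]

theorem lsAux_decomp (l : List Char) (h : '\n' ∉ l) : ∀ (rest : List Char) (i : Int),
    lsAux (l ++ '\n' :: rest) i = (i + (l.length : Int) + 1) :: lsAux rest (i + (l.length : Int) + 1) := by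
  induction l with
  | nil => intro rest i; simp [lsAux]
  | cons c t ih =>
    intro rest i
    simp only [List.mem_cons, not_or] at h
    rw [List.cons_append, lsAux, if_neg (fun hc => h.1 hc.symm), ih h.2]
    have : i + 1 + (t.length : Int) + 1 = i + ((c :: t).length : Int) + 1 := by simp; ring
    rw [this]

theorem mem_lsAux (cs : List Char) : ∀ (i x : Int), x ∈ lsAux cs i → i < x ∧ x ≤ i + (cs.length : Int) := by
  induction cs with
  | nil => intro i x hx; simp [lsAux] at hx
  | cons c rest ih =>
    intro i x hx
    by_cases hc : c = '\n'
    · subst hc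
      rw [lsAux, if_pos rfl] at hx
      rcases List.mem_cons.1 hx with h1 | h1
      · subst h1; simp
      · have := ih (i+1) x h1; simp at *; omega
    · rw [lsAux, if_neg hc] at hx
      have := ih (i+1) x hx; simp at *; omega

theorem pairwise_lsAux (cs : List Char) : ∀ i, (lsAux cs i).Pairwise (· < ·) := by
  induction cs with
  | nil => intro i; simp [lsAux]
  | cons c rest ih =>
    intro i
    by_cases hc : c = '\n'
    · subst hc
      rw [lsAux, if_pos rfl]
      exact List.pairwise_cons.2 ⟨fun x hx => (mem_lsAux rest (i+1) x hx).1, ih (i+1)⟩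
    · rw [lsAux, if_neg hc]; exact ih (i+1)

theorem starts_pairwise (cs : List Char) : (0 :: lsAux cs 0).Pairwise (· < ·) :=
  List.pairwise_cons.2 ⟨fun x hx => (mem_lsAux cs 0 x hx).1, pairwise_lsAux cs 0⟩

theorem starts_foldl (cs : List Char) : ∀ (i : Int) (acc : List Int),
    (PySem.List.enumerate cs i).foldl
      (fun acc p => if p.2 = '\n' then acc ++ [p.1 + 1] else acc) acc = acc ++ lsAux cs i := by
  induction cs with
  | nil => intro i acc; simp [PySem.List.enumerate_nil, lsAux]
  | cons c rest ih =>
    intro i acc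
    rw [PySem.List.enumerate_cons, List.foldl_cons]
    by_cases hc : c = '\n'
    · subst hc
      simp only [if_pos rfl]
      rw [ih (i+1), lsAux, if_pos rfl]
      simp
    · simp only [if_neg hc]
      rw [ih (i+1), lsAux, if_neg hc]

theorem countP_ge_of_sorted (ls : List Int) (q : Int) (hp : ls.Pairwise (· < ·))
    (m : Nat) (hm : m < ls.length) (h : ls[m] ≤ q) :
    m + 1 ≤ ls.countP (fun s => s ≤ q) := by
  have hsplit : ls.countP (fun s => s ≤ q)
      = (ls.take (m+1)).countP (fun s => s ≤ q) + (ls.drop (m+1)).countP (fun s => s ≤ q) := by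
    rw [← List.countP_append, List.take_append_drop]
  have hall : ∀ x ∈ ls.take (m+1), decide (x ≤ q) = true := by
    intro x hx
    rcases List.mem_iff_getElem.1 hx with ⟨i, hi, rfl⟩
    have hi' : i < m + 1 := by simpa using (List.length_take .. ▸ hi : i < min (m+1) ls.length) |> fun h => lt_of_lt_of_le h (min_le_left _ _)
    rw [List.getElem_take]
    have hmono := List.pairwise_iff_getElem.1 hp
    rcases Nat.lt_or_ge i m with hlt | hge
    · exact decide_eq_true (le_trans (le_of_lt (hmono i m (by omega) hm hlt)) h)
    · have : i = m := by omega
      subst this; exact decide_eq_true h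
  have : (ls.take (m+1)).countP (fun s => s ≤ q) = (ls.take (m+1)).length :=
    List.countP_eq_length.2 hall
  rw [hsplit, this]
  have : (ls.take (m+1)).length = m + 1 := by simp; omega
  omega

theorem countP_le_of_sorted (ls : List Int) (q : Int) (hp : ls.Pairwise (· < ·))
    (m : Nat) (hm : m < ls.length) (h : q < ls[m]) :
    ls.countP (fun s => s ≤ q) ≤ m := by
  have hsplit : ls.countP (fun s => s ≤ q)
      = (ls.take m).countP (fun s => s ≤ q) + (ls.drop m).countP (fun s => s ≤ q) := by
    rw [← List.countP_append, List.take_append_drop]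
  have hz : (ls.drop m).countP (fun s => s ≤ q) = 0 := by
    rw [List.countP_eq_zero]
    intro x hx
    rcases List.mem_iff_getElem.1 hx with ⟨i, hi, rfl⟩
    rw [List.getElem_drop]
    have hmono := List.pairwise_iff_getElem.1 hp
    have hil : m + i < ls.length := by simpa using hi |> fun h => by simp at hi; omega
    rcases Nat.eq_zero_or_pos i with rfl | hpos
    · simpa using h
    · simp only [decide_eq_true_eq]
      push_neg
      exact lt_of_le_of_lt (le_of_lt h) (hmono m (m+i) hm hil (by omega))
  rw [hsplit, hz]
  have := List.countP_le_length (l := ls.take m) (p := fun s => decide (s ≤ q))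
  simp at this ⊢
  omega

theorem pvBisect_count (ls : List Int) (q : Int) (hp : ls.Pairwise (· < ·)) :
    ∀ (n : Nat) (lo hi : Int), (hi - lo).toNat = n → 0 ≤ lo → hi ≤ (ls.length : Int) → lo ≤ hi →
    lo ≤ (ls.countP (fun s => s ≤ q) : Int) → (ls.countP (fun s => s ≤ q) : Int) ≤ hi →
    pvBisect ls q lo hi = (ls.countP (fun s => s ≤ q) : Int) := by
  intro n
  induction n using Nat.strong_induction_on with
  | _ n ih =>
    intro lo hi hn h0 hlen hlh hK1 hK2
    rw [pvBisect]
    by_cases h : lo < hi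
    · rw [dif_pos h]
      have hmid := PySem.Int.floordiv_two_mid_bounds (le_of_lt h)
      have hmlt : PySem.Int.floordiv (lo + hi) 2 < hi :=
        (PySem.Int.floordiv_lt_iff_lt_mul (by norm_num : (0:Int) < 2)).2 (by omega)
      set mid := PySem.Int.floordiv (lo + hi) 2 with hmdef
      have hmr : 0 ≤ mid ∧ mid < (ls.length : Int) := by omega
      have hget : PySem.List.pyGetD ls mid 0 = ls[mid.toNat]'(by omega) := by
        rw [PySem.List.pyGetD_of_nonneg ls 0 hmr.1, List.getD_eq_getElem ls 0 (by omega)]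
      by_cases hle : PySem.List.pyGetD ls mid 0 ≤ q
      · rw [if_pos hle]
        have hge := countP_ge_of_sorted ls q hp mid.toNat (by omega) (by rw [← hget]; exact hle)
        exact ih (hi - (mid+1)).toNat (by omega) (mid+1) hi rfl (by omega) hlen (by omega)
          (by omega) hK2
      · rw [if_neg hle]
        have hlt : q < ls[mid.toNat]'(by omega) := by rw [← hget]; omega
        have hle' := countP_le_of_sorted ls q hp mid.toNat (by omega) hlt
        exact ih (mid - lo).toNat (by omega) lo mid rfl h0 (by omega) (by omega) hK1 (by omega)
    · rw [dif_neg h]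
      omega

theorem totalLen_nonneg (ls : List (List Char)) : 0 ≤ totalLen ls := by
  induction ls with
  | nil => simp [totalLen]
  | cons l rest ih => simp only [totalLen, List.map_cons, List.sum_cons] at *; positivity

theorem fill_get? (L : Nat) : ∀ (d : PySem.Dict Int (Int × Int)) (cur v q : Int),
    ((PySem.List.pyRange 0 ((L : Int) + 1) 1).foldl
       (fun d i => d.insert (cur + i) (v, i)) d).get? q
    = if cur ≤ q ∧ q ≤ cur + (L : Int) then some (v, q - cur) else d.get? q := by
  induction L with
  | zero =>
    intro d cur v q
    rw [show ((0:Nat):Int) + 1 = 0 + 1 by norm_num, PySem.List.pyRange_one_singleton]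
    simp only [List.foldl_cons, List.foldl_nil]
    rw [PySem.Dict.get?_insert]
    split_ifs <;>
      first
      | rfl
      | omega
      | (simp only [Option.some.injEq, Prod.mk.injEq, true_and, and_true]; omega)
  | succ n ih =>
    intro d cur v q
    rw [show ((n+1:Nat):Int) + 1 = ((n:Int) + 1) + 1 by push_cast; ring,
        PySem.List.pyRange_one_succ_right (by omega), List.foldl_append]
    simp only [List.foldl_cons, List.foldl_nil]
    rw [PySem.Dict.get?_insert, ih d cur v q]
    have hc : ((n+1:Nat):Int) = (n:Int) + 1 := by push_cast; ring
    rw [hc]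
    split_ifs <;>
      first
      | rfl
      | omega
      | (simp only [Option.some.injEq, Prod.mk.injEq, true_and, and_true]; omega)

theorem build_get? (ls : List (List Char)) : ∀ (k cur : Int) (d : PySem.Dict Int (Int × Int)) (q : Int),
    (((PySem.List.enumerate ls k).foldl
      (fun (st : PySem.Dict Int (Int × Int) × Int) lp =>
        ((PySem.List.pyRange 0 ((lp.2.length : Int) + 1) 1).foldl
           (fun d i => d.insert (st.2 + i) (lp.1 + 1, i)) st.1,
         st.2 + ((lp.2.length : Int) + 1)))
      (d, cur)).1).get? q
    = if cur ≤ q ∧ q < cur + totalLen ls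
      then some ((specL ls (q - cur)).1 + k, (specL ls (q - cur)).2)
      else d.get? q := by
  induction ls with
  | nil =>
    intro k cur d q
    rw [PySem.List.enumerate_nil, List.foldl_nil]
    simp only [totalLen, List.map_nil, List.sum_nil]
    split_ifs with h <;> [omega; rfl]
  | cons l rest ih =>
    intro k cur d q
    have htot : totalLen (l :: rest) = ((l.length : Int) + 1) + totalLen rest := by
      simp [totalLen]
    have hnn := totalLen_nonneg rest
    rw [PySem.List.enumerate_cons, List.foldl_cons]
    rw [ih (k+1) (cur + ((l.length : Int) + 1))
        ((PySem.List.pyRange 0 ((l.length : Int) + 1) 1).foldl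
           (fun d i => d.insert (cur + i) (k + 1, i)) d) q]
    rw [fill_get? l.length d cur (k+1) q, htot]
    by_cases hA : cur ≤ q ∧ q ≤ cur + (l.length : Int)
    · rw [if_neg (show ¬(cur + ((l.length : Int) + 1) ≤ q ∧
              q < cur + ((l.length : Int) + 1) + totalLen rest) from by omega),
          if_pos hA,
          if_pos (show cur ≤ q ∧ q < cur + (((l.length : Int) + 1) + totalLen rest) from by omega)]
      rw [specL, if_pos (show q - cur ≤ (l.length : Int) from by omega)]
      simp only [Option.some.injEq, Prod.mk.injEq, true_and, and_true]
      ring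
    · by_cases hB : cur + ((l.length : Int) + 1) ≤ q ∧
          q < cur + ((l.length : Int) + 1) + totalLen rest
      · rw [if_pos hB,
            if_pos (show cur ≤ q ∧ q < cur + (((l.length : Int) + 1) + totalLen rest) from by omega)]
        rw [specL, if_neg (show ¬(q - cur ≤ (l.length : Int)) from by omega)]
        have harg : q - (cur + ((l.length : Int) + 1)) = q - cur - ((l.length : Int) + 1) := by ring
        rw [harg]
        simp only [Option.some.injEq, Prod.mk.injEq, true_and, and_true]
        ring
      · rw [if_neg hB, if_neg hA,
            if_neg (show ¬(cur ≤ q ∧ q < cur + (((l.length : Int) + 1) + totalLen rest)) from by omega)]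

theorem first_nl_split (cs : List Char) (h : '\n' ∈ cs) :
    ∃ l r, cs = l ++ '\n' :: r ∧ '\n' ∉ l := by
  induction cs with
  | nil => simp at h
  | cons c rest ih =>
    by_cases hc : c = '\n'
    · exact ⟨[], rest, by simp [hc], by simp⟩
    · have h1 : '\n' ∈ rest := by
        rcases List.mem_cons.1 h with h1 | h1
        · exact absurd h1.symm hc
        · exact h1
      rcases ih h1 with ⟨l, r, hcr, hnl⟩
      refine ⟨c :: l, r, by rw [hcr, List.cons_append], ?_⟩
      simp only [List.mem_cons, not_or]
      exact ⟨fun hh => hc hh.symm, hnl⟩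

theorem bridge (cs : List Char) (q : Int) (h0 : 0 ≤ q) (hN : q ≤ (cs.length : Int)) :
    specL (splitNL [] cs) q
      = (((0 :: lsAux cs 0).countP (fun s => s ≤ q) : Int),
         q - PySem.List.pyGetD (0 :: lsAux cs 0)
               (((0 :: lsAux cs 0).countP (fun s => s ≤ q) : Int) - 1) 0) := by
  induction hlen : cs.length using Nat.strong_induction_on generalizing cs q with
  | _ n ih =>
  by_cases hmem : '\n' ∈ cs
  · rcases first_nl_split cs hmem with ⟨l, r, rfl, hnl⟩
    have hL : ((l ++ '\n' :: r).length : Int) = (l.length : Int) + 1 + (r.length : Int) := by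
      simp; ring
    rw [splitNL_append l hnl [] ('\n' :: r)]
    rw [show splitNL ([] ++ l) ('\n' :: r) = l :: splitNL [] r from by
      rw [splitNL]; simp]
    rw [lsAux_decomp l hnl r 0]
    set S : Int := 0 + (l.length : Int) + 1 with hS
    have hSfold : lsAux r S = (lsAux r 0).map (· + S) := by
      have := lsAux_shift r 0 S
      simpa using this
    rw [hSfold]
    have hmapS : (S :: (lsAux r 0).map (· + S)) = (0 :: lsAux r 0).map (· + S) := by
      simp [hS]
    by_cases hq : q ≤ (l.length : Int)
    · have hcnt : (0 :: S :: (lsAux r 0).map (· + S)).countP (fun s => s ≤ q) = 1 := by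
        rw [List.countP_cons, List.countP_cons]
        have h1 : ¬ (S ≤ q) := by omega
        have h2 : ((lsAux r 0).map (· + S)).countP (fun s => s ≤ q) = 0 := by
          rw [List.countP_eq_zero]
          intro x hx
          rcases List.mem_map.1 hx with ⟨y, hy, rfl⟩
          have := mem_lsAux r 0 y hy
          simp only [decide_eq_true_eq]
          omega
        simp [h1, h2, h0]
      rw [hcnt]
      rw [specL, if_pos hq]
      norm_num
    · set q' : Int := q - S with hq'
      have hr0 : 0 ≤ q' := by omega
      have hrN : q' ≤ (r.length : Int) := by omega
      have hcnt1 : ∀ (t : List Int), ((t.map (· + S)).countP (fun s => s ≤ q))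
          = t.countP (fun s => s ≤ q') := by
        intro t
        rw [List.countP_map]
        apply List.countP_congr
        intro x _
        simp only [Function.comp_apply, decide_eq_true_eq]
        constructor <;> intro <;> omega
      have hK' := ih r.length (by omega) r q' hr0 hrN rfl
      set K' : Nat := (0 :: lsAux r 0).countP (fun s => s ≤ q') with hKdef
      have hK'pos : 1 ≤ K' := by
        rw [hKdef, List.countP_cons]
        simp [hr0]
      have hcons : (0 :: S :: (lsAux r 0).map (· + S)) = 0 :: (0 :: lsAux r 0).map (· + S) := by
        rw [hmapS]
      have hcnt : (0 :: S :: (lsAux r 0).map (· + S)).countP (fun s => s ≤ q) = K' + 1 := by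
        rw [hcons, List.countP_cons, hcnt1 (0 :: lsAux r 0)]
        simp [h0]
        exact hKdef.symm
      rw [hcnt]
      rw [specL, if_neg hq]
      rw [show q - ((l.length : Int) + 1) = q' from by rw [hq', hS]; ring]
      rw [hK']
      have hidx : ((K' + 1 : Nat) : Int) - 1 = ((K' : Nat) : Int) := by push_cast; ring
      rw [hidx]
      rw [PySem.List.pyGetD_natCast, PySem.List.pyGetD_of_nonneg _ _ (by push_cast; omega)]
      have htoNat : ((K' : Int) - 1).toNat = K' - 1 := by omega
      rw [htoNat]
      have hlen2 : K' ≤ (0 :: lsAux r 0).length := List.countP_le_length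
      have hgd : (0 :: S :: (lsAux r 0).map (· + S)).getD K' 0
          = (0 :: lsAux r 0).getD (K' - 1) 0 + S := by
        rcases Nat.exists_eq_add_of_le hK'pos with ⟨m, hm⟩
        rw [hcons, hm, show 1 + m - 1 = m from by omega, Nat.add_comm 1 m]
        simp only [List.getD_cons_succ]
        have hml : m < (0 :: lsAux r 0).length := by omega
        have hml2 : m < ((0 :: lsAux r 0).map (· + S)).length := by simpa using hml
        rw [List.getD_eq_getElem _ _ hml2, List.getD_eq_getElem _ _ hml, List.getElem_map]
      rw [hgd]
      simp only [Prod.mk.injEq]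
      refine ⟨by push_cast; ring, by omega⟩
  · rw [splitNL_no_nl cs hmem [], lsAux_no_nl cs hmem 0]
    rw [show ([] : List Char) ++ cs = cs from by simp]
    have hcnt : ([(0:Int)].countP (fun s => s ≤ q)) = 1 := by simp [h0]
    rw [hcnt, specL, if_pos hN]
    norm_num

-- the per-token value both programs compute, as a function of the position
theorem value_eq (cs : List Char) (q : Int) :
    (match (((PySem.List.enumerate (PySem.Chars.splitOn cs ['\n']) 0).foldl
      (fun (st : PySem.Dict Int (Int × Int) × Int) lp =>
        ((PySem.List.pyRange 0 ((lp.2.length : Int) + 1) 1).foldl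
           (fun d i => d.insert (st.2 + i) (lp.1 + 1, i)) st.1,
         st.2 + ((lp.2.length : Int) + 1)))
      (PySem.Dict.empty, 0)).1).get? q with
     | some v => v
     | none => ((1 : Int), (0 : Int)))
    = if 0 ≤ q ∧ q ≤ (cs.length : Int) then
        (pvBisect (0 :: lsAux cs 0) q 0 (((0 :: lsAux cs 0).length : Int)),
         q - PySem.List.pyGetD (0 :: lsAux cs 0)
               (pvBisect (0 :: lsAux cs 0) q 0 (((0 :: lsAux cs 0).length : Int)) - 1) 0)
      else ((1 : Int), (0 : Int)) := by
  rw [splitOn_eq, build_get? (splitNL [] cs) 0 0 PySem.Dict.empty q, totalLen_splitNL cs []]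
  by_cases h : 0 ≤ q ∧ q ≤ (cs.length : Int)
  · rw [if_pos (show (0:Int) ≤ q ∧ q < 0 + (((([]:List Char).length):Int) + (cs.length : Int) + 1)
        from by simp; omega)]
    have hbis : pvBisect (0 :: lsAux cs 0) q 0 (((0 :: lsAux cs 0).length : Int))
        = (((0 :: lsAux cs 0).countP (fun s => s ≤ q) : Nat) : Int) :=
      pvBisect_count (0 :: lsAux cs 0) q (starts_pairwise cs)
        ((((0 :: lsAux cs 0).length : Int) - 0).toNat) 0 ((0 :: lsAux cs 0).length : Int)
        rfl le_rfl le_rfl (by positivity) (by positivity)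
        (by exact_mod_cast Int.ofNat_le.2 List.countP_le_length)
    rw [if_pos h, hbis]
    have hbr := bridge cs q h.1 h.2
    rw [show q - 0 = q from by ring]
    simp [hbr]
  · rw [if_neg (show ¬((0:Int) ≤ q ∧ q < 0 + (((([]:List Char).length):Int) + (cs.length : Int) + 1))
        from by simp; omega), if_neg h]
    rw [PySem.Dict.get?_empty]

theorem match_insert (D : PySem.Dict Int (Int × Int)) (t : PySem.Dict Int (Int × Int))
    (k q : Int) :
    (match D.get? q with
     | some v => t.insert k v
     | none => t.insert k ((1 : Int), (0 : Int)))
    = t.insert k (match D.get? q with | some v => v | none => ((1 : Int), (0 : Int))) := by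
  cases D.get? q <;> rfl

theorem ite_insert (c : Prop) [Decidable c] (t : PySem.Dict Int (Int × Int))
    (k : Int) (v w : Int × Int) :
    (if c then t.insert k v else t.insert k w) = t.insert k (if c then v else w) := by
  split_ifs <;> rfl

-- ===== VERDICT (by name: the statement is the Claim_ definition above) =====
theorem map_token_to_line_py_spec : Claim_equal_map_token_to_line_py := by
  intro code tps _
  unfold Spec_map_token_to_line_py map_token_to_line_py map_token_to_line_py_alt
  simp only [starts_foldl code.toList 0 [0], match_insert, ite_insert]
  have hfresh : ∀ a ∈ PySem.List.enumerate tps 0,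
      (PySem.Dict.empty : PySem.Dict Int (Int × Int)).contains a.1 = false :=
    fun a _ => PySem.Dict.contains_empty _
  have hnodup : ((PySem.List.enumerate tps 0).map (fun a => a.1)).Nodup := by
    rw [PySem.List.map_fst_enumerate]
    exact PySem.List.nodup_pyRange_one _ _
  rw [PySem.Dict.items_foldl_insert_fresh (PySem.List.enumerate tps 0) (fun a => a.1) _
        PySem.Dict.empty hfresh hnodup,
      PySem.Dict.items_foldl_insert_fresh (PySem.List.enumerate tps 0) (fun a => a.1) _
        PySem.Dict.empty hfresh hnodup]
  congr 1
  apply List.map_congr_left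
  intro a _
  have hv := value_eq code.toList a.2
  simp only [hv, List.singleton_append]
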